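-- pv_equiv track=rewrite | github.com/shymonski-dev/Lifeguard | src/lifeguard/live_intelligence.py | _domain_allowed
-- ===== SOURCE A (Python) =====
-- def _domain_allowed(domain: str, allowed_domains: tuple[str, ...]) -> bool:
--     for allowed in allowed_domains:
--         cleaned_allowed = allowed.lower().strip()
--         if cleaned_allowed.startswith("www."):
--             cleaned_allowed = cleaned_allowed[4:]
--         if domain == cleaned_allowed:
--             return True
--         if domain.endswith("." + cleaned_allowed):
--             return True
--     return False
-- ===== SOURCE B (Python) =====
-- def _domain_allowed(domain: str, allowed_domains: tuple[str, ...]) -> bool: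
--     cleaned = set()
--     for allowed in allowed_domains:
--         c = allowed.lower().strip()
--         if c.startswith("www."):
--             c = c[4:]
--         cleaned.add(c)
--     if domain in cleaned:
--         return True
--     for i, ch in enumerate(domain):
--         if ch == "." and domain[i + 1:] in cleaned:
--             return True
--     return False
-- ===== Notes on version B (the rewrite author's own statement) =====
-- stated objective: alternative
-- what changed: Instead of scanning allowed_domains and testing domain endswith each cleaned entry, B builds the set of cleaned allowed domains once and checks membership of domain and of each dotted suffix of domain, removing the per-allowed endswith scan.
import Mathlib
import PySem

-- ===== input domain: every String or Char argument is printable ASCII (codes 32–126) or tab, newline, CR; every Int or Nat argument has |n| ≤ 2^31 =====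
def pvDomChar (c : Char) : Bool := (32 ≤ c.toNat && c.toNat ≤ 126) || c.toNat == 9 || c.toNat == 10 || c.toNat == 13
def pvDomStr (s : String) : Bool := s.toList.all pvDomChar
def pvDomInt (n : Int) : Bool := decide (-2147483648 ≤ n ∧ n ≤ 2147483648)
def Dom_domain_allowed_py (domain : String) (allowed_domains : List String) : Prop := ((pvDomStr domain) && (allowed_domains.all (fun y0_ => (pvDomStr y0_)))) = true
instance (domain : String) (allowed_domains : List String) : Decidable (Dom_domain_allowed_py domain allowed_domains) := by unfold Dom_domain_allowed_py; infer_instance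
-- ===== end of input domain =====

-- B builds the cleaned-allowed set once and tests domain and its dotted suffixes by membership,
-- instead of A's per-allowed endswith scan; alternative algorithm, same behaviour.


-- ===== PORT A =====
-- allowed.lower().strip(), dropping a leading "www." ('c[4:]' on a list is List.drop 4, exact)
def pvClean (a : String) : List Char :=
  let c := PySem.Chars.strip (PySem.Chars.lower a.toList)
  if PySem.Chars.startswith c ['w', 'w', 'w', '.'] then c.drop 4 else c

-- the 'for allowed in allowed_domains' loop of A, with early return
def pvALoop (d : List Char) : List String → Bool
  | [] => false
  | a :: rest =>
    let c := pvClean a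
    if d = c then true
    else if PySem.Chars.endswith d ('.' :: c) then true
    else pvALoop d rest

def domain_allowed_py (domain : String) (allowed_domains : List String) : Bool :=
  pvALoop domain.toList allowed_domains

-- ===== PORT B =====
-- the 'for i, ch in enumerate(domain)' loop of B: each recursive step moves to the next
-- suffix, so 'rest' is exactly domain[i+1:] at the position whose character is ch
def pvBLoop (cleaned : PySem.Set (List Char)) : List Char → Bool
  | [] => false
  | ch :: rest =>
    if ch = '.' && PySem.Set.contains cleaned rest then true
    else pvBLoop cleaned rest

def domain_allowed_py_alt (domain : String) (allowed_domains : List String) : Bool :=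
  let cleaned : PySem.Set (List Char) :=
    allowed_domains.foldl (fun s a => PySem.Set.add s (pvClean a)) PySem.Set.empty
  if PySem.Set.contains cleaned domain.toList then true
  else pvBLoop cleaned domain.toList

-- ===== PRECONDITION & SPEC =====
def Spec_domain_allowed_py (domain : String) (allowed_domains : List String) (out : Bool) : Prop := out = domain_allowed_py_alt domain allowed_domains
instance (domain : String) (allowed_domains : List String) (out : Bool) : Decidable (Spec_domain_allowed_py domain allowed_domains out) := by unfold Spec_domain_allowed_py; infer_instance

-- ===== CLAIM (what is proved, stated in full; the proofs are below) =====
def Claim_equal_domain_allowed_py : Prop := ∀ (domain : String) (allowed_domains : List String), Dom_domain_allowed_py domain allowed_domains → Spec_domain_allowed_py domain allowed_domains (domain_allowed_py domain allowed_domains)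

-- ===== LEMMAS AND PROOFS =====

theorem pvALoop_iff (d : List Char) (l : List String) :
    pvALoop d l = true ↔ ∃ a ∈ l, d = pvClean a ∨ ('.' :: pvClean a) <:+ d := by
  induction l with
  | nil => simp [pvALoop]
  | cons a rest ih =>
    simp only [pvALoop]
    split_ifs with h1 h2
    · simp [h1]
    · have := (PySem.Chars.endswith_iff d ('.' :: pvClean a)).mp h2
      simp [this]
    · have h2' : ¬ ('.' :: pvClean a) <:+ d := fun hc =>
        h2 ((PySem.Chars.endswith_iff d ('.' :: pvClean a)).mpr hc)
      simp [ih, h1, h2']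

theorem pvCleaned_mem (l : List String) (x : List Char) :
    PySem.Set.contains (l.foldl (fun s a => PySem.Set.add s (pvClean a)) PySem.Set.empty) x
      = true ↔ ∃ a ∈ l, pvClean a = x := by
  rw [← PySem.Set.update_map_eq_foldl_add]
  have h1 : PySem.Set.update (PySem.Set.empty : PySem.Set (List Char)) (l.map pvClean)
      = PySem.Set.ofList (l.map pvClean) := PySem.Set.update_empty _
  rw [h1, PySem.Set.contains_iff, PySem.Set.mem_ofList, List.mem_map]

theorem pvBLoop_iff (S : PySem.Set (List Char)) (d : List Char) :
    pvBLoop S d = true ↔ ∃ c, ('.' :: c) <:+ d ∧ PySem.Set.contains S c = true := by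
  induction d with
  | nil => simp [pvBLoop, List.suffix_nil]
  | cons ch rest ih =>
    simp only [pvBLoop]
    constructor
    · intro h
      split_ifs at h with hc
      · rcases Bool.and_eq_true_iff.mp hc with ⟨hch, hmem⟩
        exact ⟨rest, ⟨[], by simpa using (of_decide_eq_true hch ▸ rfl)⟩, hmem⟩
      · rcases ih.mp h with ⟨c, hsuf, hmem⟩
        exact ⟨c, hsuf.trans (List.suffix_cons ch rest), hmem⟩
    · rintro ⟨c, hsuf, hmem⟩
      rcases List.suffix_cons_iff.mp hsuf with heq | hsuf'
      · have h1 : ch = '.' := by injection heq with h1 _; exact h1.symm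
        have h2 : c = rest := by injection heq
        have hok : (decide (ch = '.') && PySem.Set.contains S rest) = true := by
          rw [h1, ← h2]; simpa using hmem
        rw [if_pos hok]
      · have : pvBLoop S rest = true := ih.mpr ⟨c, hsuf', hmem⟩
        split_ifs <;> simp [this]

-- ===== VERDICT (by name: the statement is the Claim_ definition above) =====
theorem domain_allowed_py_spec : Claim_equal_domain_allowed_py := by
  intro domain allowed _
  unfold Spec_domain_allowed_py domain_allowed_py domain_allowed_py_alt
  set S := allowed.foldl (fun s a => PySem.Set.add s (pvClean a)) PySem.Set.empty with hS
  set d := domain.toList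
  have key : pvALoop d allowed = (PySem.Set.contains S d || pvBLoop S d) := by
    rcases Bool.eq_false_or_eq_true (pvALoop d allowed) with h | h
    · rw [h]
      rcases (pvALoop_iff d allowed).mp h with ⟨a, ha, hd | hsuf⟩
      · have hc : PySem.Set.contains S d = true :=
          (pvCleaned_mem allowed d).mpr ⟨a, ha, hd.symm⟩
        symm; rw [Bool.or_eq_true]; exact Or.inl hc
      · have hb : pvBLoop S d = true :=
          (pvBLoop_iff S d).mpr ⟨pvClean a, hsuf, (pvCleaned_mem allowed _).mpr ⟨a, ha, rfl⟩⟩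
        symm; rw [Bool.or_eq_true]; exact Or.inr hb
    · rw [h]
      have hno : ¬ ∃ a ∈ allowed, d = pvClean a ∨ ('.' :: pvClean a) <:+ d := by
        rw [← pvALoop_iff]; simp [h]
      symm
      rw [Bool.or_eq_false_iff]
      constructor
      · rw [Bool.eq_false_iff]
        intro hc
        rcases (pvCleaned_mem allowed d).mp hc with ⟨a, ha, hca⟩
        exact hno ⟨a, ha, Or.inl hca.symm⟩
      · rw [Bool.eq_false_iff]
        intro hb
        rcases (pvBLoop_iff S d).mp hb with ⟨c, hsuf, hmem⟩
        rcases (pvCleaned_mem allowed c).mp hmem with ⟨a, ha, hca⟩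
        exact hno ⟨a, ha, Or.inr (hca ▸ hsuf)⟩
  rw [key]
  rcases Bool.eq_false_or_eq_true (PySem.Set.contains S d) with h | h <;> rw [h] <;> simp
  · exact Or.inl (by simpa using h)
  · intro hm; exact absurd hm (by simpa using h)
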